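-- pv_equiv track=rewrite | github.com/justinchuntingho/librarytools | subjectify/subjectify.py | find_field
-- ===== SOURCE A (Python) =====
-- def find_field(field, columns):
--     """Attempt to find a potential field from the CSVs columns"""
--     columns_lower = [data.lower() for data in columns]
--
--     if field.lower() in columns_lower:
--         # Easy-peasy! Just make sure we return the column name from file in case of caps differences :D
--         return columns[columns_lower.index(field.lower())]
--
--     potentials = [column for column in columns if field.lower() in column.lower()]
--     if len(potentials) >= 1:
--         return potentials[0]
--
--     return None
-- ===== SOURCE B (Python) =====
-- def find_field(field, columns):
--     """Single pass: exact match returns immediately; first substring match is remembered."""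
--     field_lower = field.lower()
--     first_substring = None
--     for column in columns:
--         column_lower = column.lower()
--         if column_lower == field_lower:
--             return column
--         if first_substring is None and field_lower in column_lower:
--             first_substring = column
--     return first_substring
-- ===== Notes on version B (the rewrite author's own statement) =====
-- stated objective: faster
-- what changed: Replaces A's three passes (lowercased copy of all columns, membership test plus index lookup, substring comprehension that recomputes field.lower() per column) with one loop that computes field.lower() once, returns an exact match immediately, and keeps the first substring match in an accumulator.
import Mathlib
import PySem

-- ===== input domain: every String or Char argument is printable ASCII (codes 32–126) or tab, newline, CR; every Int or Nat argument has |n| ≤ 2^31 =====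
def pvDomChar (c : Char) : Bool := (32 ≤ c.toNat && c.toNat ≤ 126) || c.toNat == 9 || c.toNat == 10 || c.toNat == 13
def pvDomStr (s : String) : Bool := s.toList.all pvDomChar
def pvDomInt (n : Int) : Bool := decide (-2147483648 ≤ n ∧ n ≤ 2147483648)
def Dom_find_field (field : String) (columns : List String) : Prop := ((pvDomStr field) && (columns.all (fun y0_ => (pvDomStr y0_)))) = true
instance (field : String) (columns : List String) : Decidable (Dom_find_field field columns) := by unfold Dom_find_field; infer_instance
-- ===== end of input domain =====

-- ===== PORT A =====
-- one honest line: B does one pass with an early exit and a first-substring accumulator, instead of A's three passes (simpler; return value only).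
def find_field (field : String) (columns : List String) : Option String :=
  let columns_lower := columns.map PySem.Str.lower
  let fl := PySem.Str.lower field
  if fl ∈ columns_lower then
    (PySem.List.index? columns_lower fl).bind (fun i => columns[i]?)
  else
    let potentials := columns.filter (fun column => PySem.Str.isIn fl (PySem.Str.lower column))
    if potentials.length ≥ 1 then potentials[0]? else none

-- ===== PORT B =====
def find_field_loop (fl : String) (cols : List String) (acc : Option String) : Option String :=
  match cols with
  | [] => acc
  | column :: rest =>
    let cl := PySem.Str.lower column
    if cl = fl then some column
    else find_field_loop fl rest
      (if acc.isNone && PySem.Str.isIn fl cl then some column else acc)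

def find_field_alt (field : String) (columns : List String) : Option String :=
  find_field_loop (PySem.Str.lower field) columns none

-- ===== PRECONDITION & SPEC =====
def Spec_find_field (field : String) (columns : List String) (out : Option String) : Prop := out = find_field_alt field columns
instance (field : String) (columns : List String) (out : Option String) : Decidable (Spec_find_field field columns out) := by unfold Spec_find_field; infer_instance

-- ===== CLAIM (what is proved, stated in full; the proofs are below) =====
def Claim_equal_find_field : Prop := ∀ (field : String) (columns : List String), Dom_find_field field columns → Spec_find_field field columns (find_field field columns)

-- ===== LEMMAS AND PROOFS =====

lemma find_field_loop_spec (fl : String) (cols : List String) (acc : Option String) :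
    find_field_loop fl cols acc =
      if fl ∈ cols.map PySem.Str.lower then
        (PySem.List.index? (cols.map PySem.Str.lower) fl).bind (fun i => cols[i]?)
      else
        match acc with
        | some a => some a
        | none => (cols.filter (fun c => PySem.Str.isIn fl (PySem.Str.lower c))).head? := by
  induction cols generalizing acc with
  | nil => cases acc <;> rfl
  | cons c rest ih =>
    simp only [find_field_loop]
    by_cases hc : PySem.Str.lower c = fl
    · rw [if_pos hc, List.map_cons, hc]
      rw [if_pos (List.mem_cons_self), PySem.List.index?_cons_self]
      rfl
    · rw [if_neg hc, ih, List.map_cons, List.filter_cons]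
      by_cases hm : fl ∈ rest.map PySem.Str.lower
      · rw [if_pos hm, if_pos (List.mem_cons_of_mem _ hm)]
        rw [PySem.List.index?_cons_of_ne _ hc]
        cases h : PySem.List.index? (rest.map PySem.Str.lower) fl with
        | none => simp
        | some i => simp
      · have hm' : fl ∉ (PySem.Str.lower c :: rest.map PySem.Str.lower) := by
          intro h
          rcases List.mem_cons.mp h with h | h
          · exact hc h.symm
          · exact hm h
        rw [if_neg hm, if_neg hm']
        cases acc with
        | some a => rfl
        | none =>
          simp only [Option.isNone_none, Bool.true_and]
          by_cases hs : PySem.Str.isIn fl (PySem.Str.lower c) = true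
          · rw [if_pos hs, if_pos hs]; rfl
          · rw [if_neg hs, if_neg hs]

-- ===== VERDICT (by name: the statement is the Claim_ definition above) =====
theorem find_field_spec : Claim_equal_find_field := by
  intro field columns _
  unfold Spec_find_field
  simp only [find_field, find_field_alt]
  rw [find_field_loop_spec]
  by_cases hm : PySem.Str.lower field ∈ columns.map PySem.Str.lower
  · rw [if_pos hm, if_pos hm]
  · rw [if_neg hm, if_neg hm]
    cases hl : columns.filter
        (fun c => PySem.Str.isIn (PySem.Str.lower field) (PySem.Str.lower c)) with
    | nil => rfl
    | cons a l => simp
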